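-- pv_equiv track=rewrite | github.com/K-Musembi/alx-backend-user-data | 0x01-Basic_authentication/api/v1/auth/basic_auth.py | extract_user_credentials
-- ===== SOURCE A (Python) =====
-- from typing import Tuple, TypeVar
--
-- def extract_user_credentials(decoded_base64_authorization_header:
--                              str) -> Tuple[str, str]:
--     """extract username and password"""
--     if decoded_base64_authorization_header is None or not isinstance(
--             decoded_base64_authorization_header, str):
--         return None, None
--
--     email = ""
--     password = ""
--     semicolon = ""
--     for char in decoded_base64_authorization_header:
--         if char == ":":
--             semicolon = char
--         elif semicolon == "":
--             email += char
--         else: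
--             password += char
--
--     if semicolon == "":
--         return None, None
--
--     return email, password
-- ===== SOURCE B (Python) =====
-- def extract_user_credentials(decoded_base64_authorization_header):
--     """extract username and password"""
--     if decoded_base64_authorization_header is None or not isinstance(
--             decoded_base64_authorization_header, str):
--         return None, None
--     parts = decoded_base64_authorization_header.split(":")
--     if len(parts) < 2:
--         return None, None
--     # every colon separates parts, and A's loop never appends a colon,
--     # so the password is the remaining parts joined with nothing
--     return parts[0], "".join(parts[1:])
-- ===== Notes on version B (the rewrite author's own statement) =====
-- stated objective: faster
-- what changed: replaces the character-by-character state-machine loop with quadratic-prone string += accumulation by a single str.split(":") plus an empty join of the remaining parts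
import Mathlib
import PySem

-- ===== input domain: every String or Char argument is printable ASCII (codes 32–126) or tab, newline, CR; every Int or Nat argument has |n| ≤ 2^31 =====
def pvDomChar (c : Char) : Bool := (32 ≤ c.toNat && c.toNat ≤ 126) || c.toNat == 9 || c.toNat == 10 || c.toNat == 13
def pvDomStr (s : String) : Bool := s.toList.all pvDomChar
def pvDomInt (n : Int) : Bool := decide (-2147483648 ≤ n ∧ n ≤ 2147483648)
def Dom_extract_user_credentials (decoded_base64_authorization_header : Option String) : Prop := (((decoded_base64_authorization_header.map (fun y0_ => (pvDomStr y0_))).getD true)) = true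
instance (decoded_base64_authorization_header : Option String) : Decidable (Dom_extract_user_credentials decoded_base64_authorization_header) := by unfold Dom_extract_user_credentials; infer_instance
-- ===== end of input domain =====

-- B replaces A's character-by-character state machine by split(":") + "".join of the remaining
-- parts (measured faster: C-level split/join instead of per-char += accumulation); return values proved equal for every input.

-- ===== PORT A =====
-- A's loop body: state is (email, password, semicolon), each a list of chars
def euc_step (st : List Char × List Char × List Char) (char : Char) :
    List Char × List Char × List Char :=
  if char = ':' then (st.1, st.2.1, [char])
  else if st.2.2 = [] then (st.1 ++ [char], st.2.1, st.2.2)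
  else (st.1, st.2.1 ++ [char], st.2.2)

def extract_user_credentials (decoded_base64_authorization_header : Option String) :
    Option String × Option String :=
  match decoded_base64_authorization_header with
  | none => (none, none)
  | some s =>
    let st := s.toList.foldl euc_step ([], [], [])
    if st.2.2 = [] then (none, none)
    else (some (String.ofList st.1), some (String.ofList st.2.1))

-- ===== PORT B =====
def extract_user_credentials_alt (decoded_base64_authorization_header : Option String) :
    Option String × Option String :=
  match decoded_base64_authorization_header with
  | none => (none, none)
  | some s =>
    let parts := PySem.Chars.splitOn s.toList [':']
    if parts.length < 2 then (none, none)
    else (some (String.ofList (parts.headD [])),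
          some (String.ofList (PySem.Chars.join [] parts.tail)))

-- ===== PRECONDITION & SPEC =====
def Spec_extract_user_credentials (decoded_base64_authorization_header : Option String) (out : Option String × Option String) : Prop := out = extract_user_credentials_alt decoded_base64_authorization_header
instance (decoded_base64_authorization_header : Option String) (out : Option String × Option String) : Decidable (Spec_extract_user_credentials decoded_base64_authorization_header out) := by unfold Spec_extract_user_credentials; infer_instance

-- ===== CLAIM (what is proved, stated in full; the proofs are below) =====
def Claim_equal_extract_user_credentials : Prop := ∀ (decoded_base64_authorization_header : Option String), Dom_extract_user_credentials decoded_base64_authorization_header → Spec_extract_user_credentials decoded_base64_authorization_header (extract_user_credentials decoded_base64_authorization_header)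

-- ===== LEMMAS AND PROOFS =====

-- single-character split, as a plain structural recursion
def spl (x : Char) : List Char → List (List Char)
  | [] => [[]]
  | c :: cs => if c = x then [] :: spl x cs else (spl x cs).modifyHead (c :: ·)

theorem spl_ne_nil (x : Char) (cs : List Char) : spl x cs ≠ [] := by
  induction cs with
  | nil => simp [spl]
  | cons c cs ih =>
    simp only [spl]; split
    · simp
    · cases h : spl x cs with
      | nil => exact absurd h ih
      | cons a l => simp [List.modifyHead]

theorem go_eq (x : Char) (cs : List Char) : ∀ (fuel : Nat) (cur : List Char)
    (acc : List (List Char)), cs.length ≤ fuel →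
    PySem.Chars.splitOn.go [x] fuel cs cur acc
      = acc.reverse ++ (spl x cs).modifyHead (cur.reverse ++ ·) := by
  induction cs with
  | nil =>
    intro fuel cur acc h
    cases fuel <;> simp [PySem.Chars.splitOn.go, spl]
  | cons c cs ih =>
    intro fuel cur acc h
    cases fuel with
    | zero => simp at h
    | succ f =>
      rw [PySem.Chars.splitOn.go]
      simp only [List.length_cons, Nat.add_le_add_iff_right] at h
      by_cases hc : c = x
      · subst hc
        rw [if_pos (by simp [List.isPrefixOf])]
        simp only [List.length_cons, List.length_nil, List.drop_succ_cons, List.drop_zero]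
        rw [ih f [] (cur.reverse :: acc) h]
        simp [spl]
        cases hs : spl c cs with
        | nil => exact absurd hs (spl_ne_nil c cs)
        | cons a l => simp [List.modifyHead]
      · rw [if_neg (by simp [List.isPrefixOf, Ne.symm hc])]
        rw [ih f (c :: cur) acc h]
        simp only [spl, if_neg hc]
        cases hs : spl x cs with
        | nil => exact absurd hs (spl_ne_nil x cs)
        | cons a l => simp [List.modifyHead]

theorem splitOn_single (x : Char) (cs : List Char) :
    PySem.Chars.splitOn cs [x] = spl x cs := by
  rw [PySem.Chars.splitOn, go_eq x cs (cs.length + 1) [] [] (by omega)]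
  cases hs : spl x cs with
  | nil => exact absurd hs (spl_ne_nil x cs)
  | cons a l => simp [List.modifyHead]

theorem spl_headD (x : Char) (cs : List Char) :
    (spl x cs).headD [] = cs.takeWhile (· ≠ x) := by
  induction cs with
  | nil => simp [spl]
  | cons c cs ih =>
    simp only [spl]
    by_cases hc : c = x
    · simp [hc]
    · rw [if_neg hc]
      cases hs : spl x cs with
      | nil => exact absurd hs (spl_ne_nil x cs)
      | cons a l =>
        rw [hs] at ih
        simp only [ne_eq, decide_not, List.headD_cons] at ih
        simp [List.modifyHead, hc, ih]

theorem spl_flatten (x : Char) (cs : List Char) :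
    (spl x cs).flatten = cs.filter (· ≠ x) := by
  induction cs with
  | nil => simp [spl]
  | cons c cs ih =>
    simp only [spl]
    by_cases hc : c = x
    · simp [hc, ih]
    · rw [if_neg hc]
      cases hs : spl x cs with
      | nil => exact absurd hs (spl_ne_nil x cs)
      | cons a l =>
        rw [hs] at ih
        simp only [ne_eq, decide_not, List.flatten_cons] at ih
        simp [List.modifyHead, hc, ih]

theorem spl_tail_flatten (x : Char) (cs : List Char) :
    (spl x cs).tail.flatten = ((cs.dropWhile (· ≠ x)).drop 1).filter (· ≠ x) := by
  induction cs with
  | nil => simp [spl]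
  | cons c cs ih =>
    simp only [spl]
    by_cases hc : c = x
    · simp [hc, spl_flatten]
    · rw [if_neg hc]
      cases hs : spl x cs with
      | nil => exact absurd hs (spl_ne_nil x cs)
      | cons a l =>
        rw [hs] at ih
        simpa [List.modifyHead, List.dropWhile_cons, hc] using ih

theorem spl_length (x : Char) (cs : List Char) :
    2 ≤ (spl x cs).length ↔ x ∈ cs := by
  induction cs with
  | nil => simp [spl]
  | cons c cs ih =>
    simp only [spl]
    by_cases hc : c = x
    · subst hc
      have h1 : 0 < (spl c cs).length := List.length_pos_iff.mpr (spl_ne_nil c cs)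
      rw [if_pos rfl]
      simp only [List.length_cons, List.mem_cons]
      constructor
      · intro _; exact Or.inl trivial
      · intro _; omega
    · rw [if_neg hc]
      cases hs : spl x cs with
      | nil => exact absurd hs (spl_ne_nil x cs)
      | cons a l =>
        rw [hs] at ih
        simp only [List.modifyHead, List.length_cons, List.mem_cons] at *
        rw [ih]
        constructor
        · exact Or.inr
        · rintro (h | h)
          · exact absurd h.symm hc
          · exact h

-- sep.join with the empty separator is list concatenation (no such lemma found in Mathlib)
theorem intercalate_nil (L : List (List Char)) : List.intercalate [] L = L.flatten := by
  induction L with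
  | nil => simp [List.intercalate]
  | cons a l ih => cases l <;> simp_all [List.intercalate, List.intersperse]

-- A's loop after the first colon: appends every non-colon char to the password
theorem euc_foldl_seen (cs : List Char) : ∀ (e p : List Char),
    cs.foldl euc_step (e, p, [':']) = (e, p ++ cs.filter (· ≠ ':'), [':']) := by
  induction cs with
  | nil => simp
  | cons c cs ih =>
    intro e p
    simp only [List.foldl_cons, euc_step, List.filter_cons]
    by_cases hc : c = ':'
    · simp [hc, ih]
    · simp [hc, ih, List.append_assoc]

-- A's loop before any colon
theorem euc_foldl_unseen (cs : List Char) : ∀ (e p : List Char),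
    cs.foldl euc_step (e, p, []) =
      (e ++ cs.takeWhile (· ≠ ':'),
       p ++ ((cs.dropWhile (· ≠ ':')).drop 1).filter (· ≠ ':'),
       if ':' ∈ cs then [':'] else []) := by
  induction cs with
  | nil => simp
  | cons c cs ih =>
    intro e p
    simp only [List.foldl_cons, euc_step, List.takeWhile_cons, List.dropWhile_cons]
    by_cases hc : c = ':'
    · simp [hc, euc_foldl_seen]
    · have h2 : ¬(':' = c) := fun h => hc h.symm
      simp [hc, h2, ih, List.append_assoc]

-- ===== VERDICT (by name: the statement is the Claim_ definition above) =====
theorem extract_user_credentials_spec : Claim_equal_extract_user_credentials := by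
  intro h _
  unfold Spec_extract_user_credentials extract_user_credentials extract_user_credentials_alt
  cases h with
  | none => rfl
  | some s =>
    have hlen := spl_length ':' s.toList
    by_cases hm : ':' ∈ s.toList
    · have h2 : ¬ (spl ':' s.toList).length < 2 := by
        have := hlen.mpr hm; omega
      simp only [splitOn_single, euc_foldl_unseen s.toList [] [], hm, if_true,
        PySem.Chars.join, intercalate_nil, if_neg h2]
      simp [spl_tail_flatten, List.drop_one, ← List.headD_eq_head?_getD, spl_headD]
    · have h2 : (spl ':' s.toList).length < 2 := by
        rcases Nat.lt_or_ge (spl ':' s.toList).length 2 with h | h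
        · exact h
        · exact absurd (hlen.mp h) hm
      simp only [splitOn_single, euc_foldl_unseen s.toList [] [], hm, if_false]
      simp only [if_pos (show (spl ':' s.toList).length < 2 from h2)]
      simp
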